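-- pv_equiv track=rewrite | github.com/delta-io/delta-rs | python/tests/test_optimize.py | overlap_is_suffix_like
-- ===== SOURCE A (Python) =====
-- def overlap_is_suffix_like(
--     ranges: list[tuple[int, int, int]], recent_start: int
-- ) -> bool:
--     overlapping = [max_value >= recent_start for _, max_value, _ in ranges]
--     if not any(overlapping):
--         return True
--
--     first_overlap = overlapping.index(True)
--     return all(overlapping[first_overlap:])
-- ===== SOURCE B (Python) =====
-- def overlap_is_suffix_like(
--     ranges: list[tuple[int, int, int]], recent_start: int
-- ) -> bool:
--     seen_overlap = False
--     for _, max_value, _ in ranges: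
--         if max_value >= recent_start:
--             seen_overlap = True
--         elif seen_overlap:
--             return False
--     return True
-- ===== Notes on version B (the rewrite author's own statement) =====
-- stated objective: simpler
-- what changed: Fuses A's four passes (comprehension building the overlap list, any, .index, all over a slice) into one short-circuiting single pass that keeps only a seen_overlap flag and returns False the first time a non-overlap follows an overlap.
import Mathlib
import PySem

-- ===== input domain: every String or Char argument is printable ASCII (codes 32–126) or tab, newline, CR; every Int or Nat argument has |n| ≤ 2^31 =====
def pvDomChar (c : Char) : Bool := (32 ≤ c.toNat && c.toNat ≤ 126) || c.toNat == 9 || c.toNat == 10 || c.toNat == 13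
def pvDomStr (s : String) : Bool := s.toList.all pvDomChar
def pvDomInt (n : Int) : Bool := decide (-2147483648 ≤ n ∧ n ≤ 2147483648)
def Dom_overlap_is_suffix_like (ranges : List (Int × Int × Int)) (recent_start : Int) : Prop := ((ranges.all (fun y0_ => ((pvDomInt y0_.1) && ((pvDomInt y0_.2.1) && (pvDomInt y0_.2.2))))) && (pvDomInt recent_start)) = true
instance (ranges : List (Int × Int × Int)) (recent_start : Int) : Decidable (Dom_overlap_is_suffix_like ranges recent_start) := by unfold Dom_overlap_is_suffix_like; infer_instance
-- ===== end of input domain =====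

-- B replaces A's build-list-then-any/index/all strategy with one single-pass scan keeping a seen_overlap flag (objective: simpler).


-- ===== PORT A =====
def overlap_is_suffix_like (ranges : List (Int × Int × Int)) (recent_start : Int) : Bool :=
  let overlapping := ranges.map (fun r => decide (r.2.1 ≥ recent_start))
  if !(overlapping.any id) then true
  else
    match PySem.List.index? overlapping true with
    | some first_overlap => (PySem.List.slice overlapping (some (first_overlap : Int)) none).all id
    | none => true  -- unreachable: `.index` is only reached when `any overlapping` holds

-- ===== PORT B =====
def overlap_is_suffix_like_loop (recent_start : Int) : List (Int × Int × Int) → Bool → Bool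
  | [], _ => true
  | (_, max_value, _) :: rest, seen_overlap =>
      if max_value ≥ recent_start then overlap_is_suffix_like_loop recent_start rest true
      else if seen_overlap then false
      else overlap_is_suffix_like_loop recent_start rest seen_overlap

def overlap_is_suffix_like_alt (ranges : List (Int × Int × Int)) (recent_start : Int) : Bool :=
  overlap_is_suffix_like_loop recent_start ranges false

-- ===== PRECONDITION & SPEC =====
def Spec_overlap_is_suffix_like (ranges : List (Int × Int × Int)) (recent_start : Int) (out : Bool) : Prop := out = overlap_is_suffix_like_alt ranges recent_start
instance (ranges : List (Int × Int × Int)) (recent_start : Int) (out : Bool) : Decidable (Spec_overlap_is_suffix_like ranges recent_start out) := by unfold Spec_overlap_is_suffix_like; infer_instance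

-- ===== CLAIM (what is proved, stated in full; the proofs are below) =====
def Claim_equal_overlap_is_suffix_like : Prop := ∀ (ranges : List (Int × Int × Int)) (recent_start : Int), Dom_overlap_is_suffix_like ranges recent_start → Spec_overlap_is_suffix_like ranges recent_start (overlap_is_suffix_like ranges recent_start)

-- ===== LEMMAS AND PROOFS =====

-- A's value, expressed on the boolean overlap list it builds.
def aForm (l : List Bool) : Bool :=
  if !(l.any id) then true
  else
    match PySem.List.index? l true with
    | some i => (PySem.List.slice l (some (i : Int)) none).all id
    | none => true

-- B's loop, expressed on the boolean overlap list.
def bLoop : List Bool → Bool → Bool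
  | [], _ => true
  | b :: t, seen =>
      if b then bLoop t true
      else if seen then false
      else bLoop t seen

theorem bLoop_true (l : List Bool) : bLoop l true = l.all id := by
  induction l with
  | nil => rfl
  | cons b t ih => cases b <;> simp [bLoop, ih]

theorem aForm_cons_false (t : List Bool) : aForm (false :: t) = aForm t := by
  by_cases h : t.any id = true
  · obtain ⟨i, hi⟩ := Option.isSome_iff_exists.mp
      ((PySem.List.index?_isSome_iff t true).mpr (by simpa [List.any_eq_true] using h))
    rw [aForm, aForm, PySem.List.index?_cons_of_ne t (by simp), hi]
    simp [h]
    rw [show ((i : Int) + 1) = ((i + 1 : Nat) : Int) from by push_cast; ring,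
      PySem.List.slice_from_natCast, List.drop_succ_cons]
  · simp [aForm, List.any_cons, h]

theorem bLoop_eq_aForm (l : List Bool) : bLoop l false = aForm l := by
  induction l with
  | nil => rfl
  | cons b t ih =>
    cases b with
    | true =>
      have hb : bLoop (true :: t) false = bLoop t true := rfl
      rw [hb, bLoop_true, aForm, PySem.List.index?_cons_self]
      simp [PySem.List.slice_none_none]
    | false =>
      have hb : bLoop (false :: t) false = bLoop t false := rfl
      rw [hb, ih, aForm_cons_false]

-- B's loop on ranges tracks bLoop on the mapped boolean list.
theorem loop_eq_bLoop (recent_start : Int) (ranges : List (Int × Int × Int)) (seen : Bool) :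
    overlap_is_suffix_like_loop recent_start ranges seen
      = bLoop (ranges.map (fun r => decide (r.2.1 ≥ recent_start))) seen := by
  induction ranges generalizing seen with
  | nil => rfl
  | cons r t ih =>
    obtain ⟨a, m, c⟩ := r
    by_cases h : m ≥ recent_start <;>
      simp [overlap_is_suffix_like_loop, bLoop, h, ih]

-- ===== VERDICT (by name: the statement is the Claim_ definition above) =====
theorem overlap_is_suffix_like_spec : Claim_equal_overlap_is_suffix_like := by
  intro ranges recent_start _
  unfold Spec_overlap_is_suffix_like overlap_is_suffix_like overlap_is_suffix_like_alt
  rw [loop_eq_bLoop, bLoop_eq_aForm, aForm]
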